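-- pv_equiv track=rewrite | github.com/RioKato/pwnlib | tool/elfgen.py | gencode
-- ===== SOURCE A (Python) =====
-- def gencode(name: str, assign: dict[str, list[int]]) -> str:
--     from ast import AnnAssign, ClassDef, Constant, List, Load, Module, Name, Store, Subscript, unparse
--
--     def annassign(name: str, values: list[int]) -> AnnAssign:
--         if len(values) == 1:
--             return AnnAssign(target=Name(id=name, ctx=Store()),
--                              annotation=Name(id='int', ctx=Load()),
--                              value=Constant(value=values[0]),
--                              simple=1)
--         else:
--             return AnnAssign(target=Name(id=name, ctx=Store()),
--                              annotation=Subscript(value=Name(id='list', ctx=Load()), slice=Name(id='int', ctx=Load()), ctx=Load()),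
--                              value=List(elts=[Constant(value=v) for v in values], ctx=Load()),
--                              simple=1)
--
--     def classdef(name: str, assign: dict[str, list[int]]) -> ClassDef:
--         return ClassDef(name=name,
--                         bases=[],
--                         keywords=[],
--                         body=[annassign(k, v) for k, v in assign.items()],
--                         decorator_list=[],
--                         type_params=[])
--
--     def module(name: str, assign: dict[str, list[int]]) -> Module:
--         return Module(
--             body=[classdef(name, assign)],
--             type_ignores=[])
--
--     return unparse(module(name, assign))
-- ===== SOURCE B (Python) =====
-- def gencode(name: str, assign: dict[str, list[int]]) -> str:
--     lines = [f'class {name}:']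
--     for k, vs in assign.items():
--         if len(vs) == 1:
--             lines.append(f'    {k}: int = {vs[0]}')
--         else:
--             lines.append(f"    {k}: list[int] = [{', '.join(str(v) for v in vs)}]")
--     return '\n'.join(lines)
-- ===== Notes on version B (the rewrite author's own statement) =====
-- stated objective: simpler
-- what changed: B drops the ast module entirely: instead of building AnnAssign/ClassDef/Module AST nodes and calling ast.unparse, it formats each assignment directly as an f-string line and joins the lines with newlines.
import Mathlib
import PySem

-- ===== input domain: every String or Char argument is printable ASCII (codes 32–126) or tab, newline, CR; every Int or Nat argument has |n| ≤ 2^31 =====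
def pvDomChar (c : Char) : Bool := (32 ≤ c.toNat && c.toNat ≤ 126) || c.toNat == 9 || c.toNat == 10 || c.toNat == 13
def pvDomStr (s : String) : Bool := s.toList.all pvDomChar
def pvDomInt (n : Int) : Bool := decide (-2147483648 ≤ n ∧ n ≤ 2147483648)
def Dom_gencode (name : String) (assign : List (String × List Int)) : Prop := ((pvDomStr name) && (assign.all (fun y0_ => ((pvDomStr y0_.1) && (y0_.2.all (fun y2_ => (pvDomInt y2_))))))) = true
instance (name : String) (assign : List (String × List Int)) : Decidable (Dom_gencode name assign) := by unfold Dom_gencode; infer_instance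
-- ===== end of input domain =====

-- B builds the class source with plain string formatting instead of ast node construction + ast.unparse (objective: simpler).

-- Python's sep.join(xs), used by both sides (exact: empty list -> "", otherwise fold with sep)
def pyJoin (sep : String) : List String → String
  | [] => ""
  | x :: xs => xs.foldl (fun acc y => acc ++ sep ++ y) x

-- ===== PORT A =====
-- A builds AST nodes (AnnAssign of a Constant / of a List of Constants) and calls
-- ast.unparse; the two node shapes A constructs are mirrored by an inductive, and
-- ast.unparse (a stdlib call) is ported by the renderers below, exact on exactly the
-- ASTs A builds (one ClassDef with AnnAssign bodies; empty body renders nothing).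
inductive PyAnnAssign where
  | one : String → Int → PyAnnAssign          -- annotation Name 'int', value Constant
  | many : String → List Int → PyAnnAssign    -- annotation Subscript list[int], value List
deriving DecidableEq, Repr

def annassignA (name : String) (values : List Int) : PyAnnAssign :=
  if values.length = 1 then
    PyAnnAssign.one name (values.headD 0)     -- values[0]; in range since len(values) == 1
  else
    PyAnnAssign.many name values

def classdefA (assign : List (String × List Int)) : List PyAnnAssign :=
  assign.map (fun kv => annassignA kv.1 kv.2)

-- ast.unparse of one AnnAssign statement
def unparseAnn : PyAnnAssign → String
  | PyAnnAssign.one name v => name ++ ": int = " ++ PySem.Int.toStr v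
  | PyAnnAssign.many name vs =>
      name ++ ": list[int] = [" ++ pyJoin ", " (vs.map PySem.Int.toStr) ++ "]"

-- ast.unparse of the Module holding the single ClassDef: 'class name:' header, then each
-- body statement on its own line indented four spaces
def unparseModule (name : String) (body : List PyAnnAssign) : String :=
  "class " ++ name ++ ":" ++ String.join (body.map (fun a => "\n" ++ ("    " ++ unparseAnn a)))

def gencode (name : String) (assign : List (String × List Int)) : String :=
  unparseModule name (classdefA assign)

-- ===== PORT B =====
def lineB (k : String) (vs : List Int) : String :=
  match vs with
  | [v] => "    " ++ (k ++ ": int = " ++ PySem.Int.toStr v)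
  | _ => "    " ++ (k ++ ": list[int] = [" ++ pyJoin ", " (vs.map PySem.Int.toStr) ++ "]")

def gencode_alt (name : String) (assign : List (String × List Int)) : String :=
  pyJoin "\n" (("class " ++ name ++ ":") :: assign.map (fun kv => lineB kv.1 kv.2))

-- ===== PRECONDITION & SPEC =====
def Spec_gencode (name : String) (assign : List (String × List Int)) (out : String) : Prop := out = gencode_alt name assign
instance (name : String) (assign : List (String × List Int)) (out : String) : Decidable (Spec_gencode name assign out) := by unfold Spec_gencode; infer_instance

-- ===== CLAIM (what is proved, stated in full; the proofs are below) =====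
def Claim_equal_gencode : Prop := ∀ (name : String) (assign : List (String × List Int)), Dom_gencode name assign → Spec_gencode name assign (gencode name assign)

-- ===== LEMMAS AND PROOFS =====

-- the fold in pyJoin with accumulator acc is acc ++ the fold started from ""
theorem foldl_pre (g : String → String) (xs : List String) (acc : String) :
    xs.foldl (fun a y => a ++ g y) acc = acc ++ xs.foldl (fun a y => a ++ g y) "" := by
  induction xs generalizing acc with
  | nil => simp
  | cons y ys ih =>
      simp only [List.foldl]
      rw [ih (acc ++ g y), ih ("" ++ g y)]
      simp [String.append_assoc]

-- '\n'.join(h :: xs) = h ++ concatenation of the '\n'-prefixed tail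
theorem pyJoin_nl (h : String) (xs : List String) :
    pyJoin "\n" (h :: xs) = h ++ String.join (xs.map (fun x => "\n" ++ x)) := by
  have e : (fun (a y : String) => a ++ "\n" ++ y) = (fun a y => a ++ ("\n" ++ y)) := by
    funext a y; rw [String.append_assoc]
  rw [pyJoin, e, foldl_pre (fun y => "\n" ++ y) xs h]
  simp [String.join, List.foldl_map]

-- per element: B's line is A's rendered statement with the four-space indent
theorem line_eq (k : String) (vs : List Int) :
    lineB k vs = "    " ++ unparseAnn (annassignA k vs) := by
  match vs with
  | [v] => simp [lineB, annassignA, unparseAnn]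
  | [] => simp [lineB, annassignA, unparseAnn]
  | v :: w :: rest => simp [lineB, annassignA, unparseAnn]

-- ===== VERDICT (by name: the statement is the Claim_ definition above) =====
theorem gencode_spec : Claim_equal_gencode := by
  intro name assign _
  unfold Spec_gencode gencode gencode_alt unparseModule classdefA
  rw [pyJoin_nl]
  congr 1
  rw [List.map_map, List.map_map]
  apply congrArg
  apply List.map_congr_left
  intro kv _
  simp [Function.comp, line_eq]
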